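-- pv_equiv track=rewrite | github.com/chrishaid/auto-ml-research | chart_comparison.py | format_config_lines
-- ===== SOURCE A (Python) =====
-- def format_config_lines(stages):
--     """Format parsed stages into display lines for the chart."""
--     lines = []
--     for name, params in stages:
--         # Categorize the stage
--         algo_names = {"RandomForest", "GradientBoosting", "ExtraTrees", "XGBoost",
--                       "LightGBM", "Ridge", "Lasso", "ElasticNet", "SVR", "SVC",
--                       "KNeighbors", "DecisionTree", "AdaBoost", "MLP",
--                       "LogisticRegression"}
--         preproc_names = {"StandardScaler", "MinMaxScaler", "RobustScaler", "PCA",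
--                          "PolynomialFeatures"}
--         fs_names = {"SelectKBest", "passthrough"}
--         prep_names = {"SimpleImputer_mean", "SimpleImputer_median",
--                       "SimpleImputer_most_frequent", "KNNImputer",
--                       "OutlierClipper", "Winsorizer"}
--
--         if name in algo_names:
--             tag = "ALGO"
--         elif name in fs_names:
--             tag = "FEAT"
--         elif name in preproc_names:
--             tag = "PREP"
--         elif name in prep_names:
--             tag = "DATA"
--         else:
--             tag = "    "
--
--         lines.append((tag, name, params))
--     return lines
-- ===== SOURCE B (Python) =====
-- # B: staged "stamping" passes instead of a single pass with a branch chain: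
-- # start with every line tagged blank, then one pass per category overwrites the
-- # tag of the stages belonging to that category (categories are disjoint, so
-- # pass order does not matter), and a final zip assembles the lines.
--
-- _CATEGORIES = [
--     ("ALGO", frozenset({"RandomForest", "GradientBoosting", "ExtraTrees",
--                         "XGBoost", "LightGBM", "Ridge", "Lasso", "ElasticNet",
--                         "SVR", "SVC", "KNeighbors", "DecisionTree", "AdaBoost",
--                         "MLP", "LogisticRegression"})),
--     ("FEAT", frozenset({"SelectKBest", "passthrough"})),
--     ("PREP", frozenset({"StandardScaler", "MinMaxScaler", "RobustScaler",
--                         "PCA", "PolynomialFeatures"})),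
--     ("DATA", frozenset({"SimpleImputer_mean", "SimpleImputer_median",
--                         "SimpleImputer_most_frequent", "KNNImputer",
--                         "OutlierClipper", "Winsorizer"})),
-- ]
--
--
-- def _stamp(tags, stages, tag, names):
--     """One pass: overwrite the tag of every stage whose name is in names."""
--     return [tag if name in names else t for t, (name, _) in zip(tags, stages)]
--
--
-- def format_config_lines(stages):
--     """Format parsed stages into display lines for the chart."""
--     tags = ["    "] * len(stages)
--     for tag, names in _CATEGORIES:
--         tags = _stamp(tags, stages, tag, names)
--     return [(t, name, params) for t, (name, params) in zip(tags, stages)]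
-- ===== Notes on version B (the rewrite author's own statement) =====
-- stated objective: alternative
-- what changed: Replaces A's single pass with a per-stage four-way if/elif membership chain by staged category passes: a blank tag array is stamped once per category (overwriting tags of matching stages, valid because the categories are disjoint) and then zipped with the stages.
import Mathlib
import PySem

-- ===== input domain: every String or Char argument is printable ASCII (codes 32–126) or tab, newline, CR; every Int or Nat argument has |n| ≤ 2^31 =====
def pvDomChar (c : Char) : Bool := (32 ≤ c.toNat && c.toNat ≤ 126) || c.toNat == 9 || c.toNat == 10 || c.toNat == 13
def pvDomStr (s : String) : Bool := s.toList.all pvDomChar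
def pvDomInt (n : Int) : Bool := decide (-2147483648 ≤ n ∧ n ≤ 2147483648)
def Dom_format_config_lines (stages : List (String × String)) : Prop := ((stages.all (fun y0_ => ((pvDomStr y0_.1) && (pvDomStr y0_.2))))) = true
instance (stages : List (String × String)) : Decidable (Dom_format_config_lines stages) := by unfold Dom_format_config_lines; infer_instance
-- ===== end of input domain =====

-- ===== PORT A =====
-- B replaces A's single pass with a four-way branch chain by staged category
-- passes that stamp a blank tag array (objective: alternative; same cost).
-- A-side helpers: the four literal sets A builds each iteration.
def aAlgoNames : PySem.Set String := PySem.Set.ofList ["RandomForest", "GradientBoosting", "ExtraTrees", "XGBoost", "LightGBM", "Ridge", "Lasso", "ElasticNet", "SVR", "SVC", "KNeighbors", "DecisionTree", "AdaBoost", "MLP", "LogisticRegression"]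
def aPreprocNames : PySem.Set String := PySem.Set.ofList ["StandardScaler", "MinMaxScaler", "RobustScaler", "PCA", "PolynomialFeatures"]
def aFsNames : PySem.Set String := PySem.Set.ofList ["SelectKBest", "passthrough"]
def aPrepNames : PySem.Set String := PySem.Set.ofList ["SimpleImputer_mean", "SimpleImputer_median", "SimpleImputer_most_frequent", "KNNImputer", "OutlierClipper", "Winsorizer"]

def format_config_lines (stages : List (String × String)) : List (String × String × String) :=
  stages.foldl (fun lines np =>
    let name := np.1
    let params := np.2
    let tag :=
      if PySem.Set.contains aAlgoNames name then "ALGO"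
      else if PySem.Set.contains aFsNames name then "FEAT"
      else if PySem.Set.contains aPreprocNames name then "PREP"
      else if PySem.Set.contains aPrepNames name then "DATA"
      else "    "
    lines ++ [(tag, name, params)]) []

-- ===== PORT B =====
-- B-side helpers: the category list and one stamping pass.
def bAlgoSet : PySem.Set String := PySem.Set.ofList ["RandomForest", "GradientBoosting", "ExtraTrees", "XGBoost", "LightGBM", "Ridge", "Lasso", "ElasticNet", "SVR", "SVC", "KNeighbors", "DecisionTree", "AdaBoost", "MLP", "LogisticRegression"]
def bFeatSet : PySem.Set String := PySem.Set.ofList ["SelectKBest", "passthrough"]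
def bPrepSet : PySem.Set String := PySem.Set.ofList ["StandardScaler", "MinMaxScaler", "RobustScaler", "PCA", "PolynomialFeatures"]
def bDataSet : PySem.Set String := PySem.Set.ofList ["SimpleImputer_mean", "SimpleImputer_median", "SimpleImputer_most_frequent", "KNNImputer", "OutlierClipper", "Winsorizer"]

def bCategories : List (String × PySem.Set String) :=
  [("ALGO", bAlgoSet), ("FEAT", bFeatSet), ("PREP", bPrepSet), ("DATA", bDataSet)]

-- one pass: overwrite the tag of every stage whose name is in names
def bStamp (tags : List String) (stages : List (String × String)) (tag : String) (names : PySem.Set String) : List String :=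
  (tags.zip stages).map (fun p => if PySem.Set.contains names p.2.1 then tag else p.1)

def format_config_lines_alt (stages : List (String × String)) : List (String × String × String) :=
  let tags := bCategories.foldl (fun ts c => bStamp ts stages c.1 c.2) (List.replicate stages.length "    ")
  (tags.zip stages).map (fun p => (p.1, p.2.1, p.2.2))

-- ===== PRECONDITION & SPEC =====
def Spec_format_config_lines (stages : List (String × String)) (out : List (String × String × String)) : Prop := out = format_config_lines_alt stages
instance (stages : List (String × String)) (out : List (String × String × String)) : Decidable (Spec_format_config_lines stages out) := by unfold Spec_format_config_lines; infer_instance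

-- ===== CLAIM (what is proved, stated in full; the proofs are below) =====
def Claim_equal_format_config_lines : Prop := ∀ (stages : List (String × String)), Dom_format_config_lines stages → Spec_format_config_lines stages (format_config_lines stages)

-- ===== LEMMAS AND PROOFS =====
-- A's chain tag, as a function (used only in the proofs).
def tagA (name : String) : String :=
  if PySem.Set.contains aAlgoNames name then "ALGO"
  else if PySem.Set.contains aFsNames name then "FEAT"
  else if PySem.Set.contains aPreprocNames name then "PREP"
  else if PySem.Set.contains aPrepNames name then "DATA"
  else "    "

-- Pointwise: B's four successive stamps of one tag equal A's chain (the
-- categories are disjoint, so the overwrite order does not matter).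
theorem tag_eq (name : String) :
    (if PySem.Set.contains bDataSet name then "DATA"
     else if PySem.Set.contains bPrepSet name then "PREP"
     else if PySem.Set.contains bFeatSet name then "FEAT"
     else if PySem.Set.contains bAlgoSet name then "ALGO"
     else "    ") = tagA name := by
  by_cases h : name ∈ (["RandomForest", "GradientBoosting", "ExtraTrees", "XGBoost", "LightGBM", "Ridge", "Lasso", "ElasticNet", "SVR", "SVC", "KNeighbors", "DecisionTree", "AdaBoost", "MLP", "LogisticRegression", "SelectKBest", "passthrough", "StandardScaler", "MinMaxScaler", "RobustScaler", "PCA", "PolynomialFeatures", "SimpleImputer_mean", "SimpleImputer_median", "SimpleImputer_most_frequent", "KNNImputer", "OutlierClipper", "Winsorizer"] : List String)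
  · fin_cases h <;> decide
  · simp only [List.mem_cons, List.not_mem_nil, or_false, not_or] at h
    obtain ⟨h1,h2,h3,h4,h5,h6,h7,h8,h9,h10,h11,h12,h13,h14,h15,h16,h17,h18,h19,h20,h21,h22,h23,h24,h25,h26,h27,h28⟩ := h
    simp [tagA, bAlgoSet, bFeatSet, bPrepSet, bDataSet,
      aAlgoNames, aFsNames, aPreprocNames, aPrepNames,
      PySem.Set.contains, PySem.Set.ofList,
      h1,h2,h3,h4,h5,h6,h7,h8,h9,h10,h11,h12,h13,h14,h15,h16,h17,h18,h19,h20,h21,h22,h23,h24,h25,h26,h27,h28]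

-- B's four stamping passes over the blank array produce A's chain tag per stage.
theorem stamp4_eq (stages : List (String × String)) :
    bStamp (bStamp (bStamp (bStamp (List.replicate stages.length "    ") stages
        "ALGO" bAlgoSet) stages "FEAT" bFeatSet) stages "PREP" bPrepSet) stages
        "DATA" bDataSet
      = stages.map (fun np => tagA np.1) := by
  induction stages with
  | nil => rfl
  | cons a l ih =>
    simp only [List.length_cons, List.replicate_succ, bStamp, List.zip_cons_cons,
      List.map_cons] at ih ⊢
    exact congrArg₂ List.cons (tag_eq a.1) ih

-- A's append loop equals mapping tagA over the stages.
theorem a_eq_map (stages : List (String × String)) (acc : List (String × String × String)) :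
    stages.foldl (fun lines np =>
      let name := np.1
      let params := np.2
      let tag :=
        if PySem.Set.contains aAlgoNames name then "ALGO"
        else if PySem.Set.contains aFsNames name then "FEAT"
        else if PySem.Set.contains aPreprocNames name then "PREP"
        else if PySem.Set.contains aPrepNames name then "DATA"
        else "    "
      lines ++ [(tag, name, params)]) acc
    = acc ++ stages.map (fun np => (tagA np.1, np.1, np.2)) := by
  induction stages generalizing acc with
  | nil => simp
  | cons h t ih => rw [List.foldl_cons, ih]; simp [tagA]

-- B's final zip of tags with stages equals the direct map.
theorem b_zip_eq (stages : List (String × String)) :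
    ((stages.map (fun np => tagA np.1)).zip stages).map (fun p => (p.1, p.2.1, p.2.2))
      = stages.map (fun np => (tagA np.1, np.1, np.2)) := by
  induction stages with
  | nil => rfl
  | cons a l ih => simp [ih]

-- ===== VERDICT (by name: the statement is the Claim_ definition above) =====
theorem format_config_lines_spec : Claim_equal_format_config_lines := by
  intro stages _
  unfold Spec_format_config_lines format_config_lines format_config_lines_alt
  rw [a_eq_map, List.nil_append]
  have hfold : bCategories.foldl (fun ts c => bStamp ts stages c.1 c.2)
      (List.replicate stages.length "    ") = stages.map (fun np => tagA np.1) := by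
    simp only [bCategories, List.foldl]
    exact stamp4_eq stages
  simp only [hfold]
  exact (b_zip_eq stages).symm
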